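-- pv_equiv track=rewrite | github.com/DA-testa/convert-array-into-heap-kigursjanis | build_heap.py | swaping
-- ===== SOURCE A (Python) =====
-- def swaping(nowSwapIndex, swaps, data):
--     n = len(data)
--     swapIndex1 = nowSwapIndex * 2 + 1
--     swapIndex2 = nowSwapIndex * 2 + 2
--     if swapIndex1 >= n:
--         return swaps
--     if swapIndex2 >= n or data[swapIndex1] < data[swapIndex2]:
--         minSwapIndex = swapIndex1
--     else:
--         minSwapIndex = swapIndex2
--     if data[nowSwapIndex] > data[minSwapIndex]:
--         data[nowSwapIndex], data[minSwapIndex] = data[minSwapIndex], data[nowSwapIndex]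
--         swaps.append((nowSwapIndex, minSwapIndex))
--         swaps = swaping(minSwapIndex, swaps, data)
--     return swaps
-- ===== SOURCE B (Python) =====
-- def swaping(nowSwapIndex, swaps, data):
--     # hold-value sift-down: keep the sinking value in v, shift smaller children up,
--     # write v once at its final slot (same swaps list and same final data as A)
--     n = len(data)
--     i = nowSwapIndex
--     c = 2 * i + 1
--     if c >= n:
--         return swaps
--     v = data[i]
--     while c < n:
--         if c + 1 < n and data[c + 1] <= data[c]:
--             c = c + 1
--         if v <= data[c]:
--             break
--         data[i] = data[c]
--         swaps.append((i, c))
--         i = c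
--         c = 2 * i + 1
--     data[i] = v
--     return swaps
-- ===== Notes on version B (the rewrite author's own statement) =====
-- stated objective: alternative
-- what changed: Replaces A's recursive swap-at-every-level sift-down by an iterative hold-value sift-down that keeps the sinking element in a variable, shifts the smaller child up with one write per level, and writes the held value once at the end (same swaps list, same final data).
-- outside the precondition, e.g. on swaping(-1, [], [3, 1, 2]): A returns [], B returns []
import Mathlib
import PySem

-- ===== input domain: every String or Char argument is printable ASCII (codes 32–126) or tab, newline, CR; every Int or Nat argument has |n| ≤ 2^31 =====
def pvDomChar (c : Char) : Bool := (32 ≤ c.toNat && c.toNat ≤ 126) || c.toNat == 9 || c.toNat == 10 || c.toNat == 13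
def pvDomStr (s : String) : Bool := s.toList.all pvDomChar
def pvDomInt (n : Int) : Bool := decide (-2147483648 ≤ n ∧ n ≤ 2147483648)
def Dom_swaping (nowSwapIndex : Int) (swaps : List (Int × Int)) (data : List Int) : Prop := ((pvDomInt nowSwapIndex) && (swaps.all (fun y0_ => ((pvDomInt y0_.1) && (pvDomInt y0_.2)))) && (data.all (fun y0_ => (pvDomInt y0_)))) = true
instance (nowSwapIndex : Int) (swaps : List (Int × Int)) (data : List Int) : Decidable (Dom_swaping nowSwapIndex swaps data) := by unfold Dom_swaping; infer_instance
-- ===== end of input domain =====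

-- B replaces the recursive swap-per-level sift-down with an iterative hold-value sift-down
-- (same swaps returned; both mutate data and swaps in Python, with the same final contents —
-- the equivalence proved here is about the returned swaps list).


-- ===== PORT A =====
def swapingFuel : Nat → Int → List (Int × Int) → List Int → List (Int × Int)
  | 0, _, swaps, _ => swaps
  | f+1, nowSwapIndex, swaps, data =>
    let n : Int := PySem.List.len data
    let swapIndex1 := nowSwapIndex * 2 + 1
    let swapIndex2 := nowSwapIndex * 2 + 2
    if swapIndex1 ≥ n then swaps
    else
      let minSwapIndex :=
        if swapIndex2 ≥ n ∨ PySem.List.pyGetD data swapIndex1 0 < PySem.List.pyGetD data swapIndex2 0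
        then swapIndex1 else swapIndex2
      if PySem.List.pyGetD data nowSwapIndex 0 > PySem.List.pyGetD data minSwapIndex 0 then
        -- data[i], data[m] = data[m], data[i]
        let data' := PySem.List.pySetD (PySem.List.pySetD data nowSwapIndex (PySem.List.pyGetD data minSwapIndex 0))
                       minSwapIndex (PySem.List.pyGetD data nowSwapIndex 0)
        swapingFuel f minSwapIndex (swaps ++ [(nowSwapIndex, minSwapIndex)]) data'
      else swaps

-- fuel data.length + 1 suffices: under Pre_ the index strictly increases and stays < length
def swaping (nowSwapIndex : Int) (swaps : List (Int × Int)) (data : List Int) : List (Int × Int) :=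
  swapingFuel (data.length + 1) nowSwapIndex swaps data

-- ===== PORT B =====
-- the while-loop of Source B; state (i, c, v) with v the held sinking value
def siftLoop : Nat → Int → Int → Int → List (Int × Int) → List Int → List (Int × Int)
  | 0, _, _, _, swaps, _ => swaps
  | f+1, i, c, v, swaps, data =>
    let n : Int := PySem.List.len data
    if c < n then
      let c' := if c + 1 < n ∧ PySem.List.pyGetD data (c + 1) 0 ≤ PySem.List.pyGetD data c 0 then c + 1 else c
      if v ≤ PySem.List.pyGetD data c' 0 then swaps
      else siftLoop f c' (2 * c' + 1) v (swaps ++ [(i, c')]) (PySem.List.pySetD data i (PySem.List.pyGetD data c' 0))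
    else swaps

def swaping_alt (nowSwapIndex : Int) (swaps : List (Int × Int)) (data : List Int) : List (Int × Int) :=
  let n : Int := PySem.List.len data
  let c := 2 * nowSwapIndex + 1
  if c ≥ n then swaps
  else siftLoop (data.length + 1) nowSwapIndex c (PySem.List.pyGetD data nowSwapIndex 0) swaps data

-- ===== PRECONDITION & SPEC =====
-- Pre_ restricts to nonnegative heap indices, the function's natural domain: for negative
-- nowSwapIndex Python A either raises IndexError (deep negative indices) or returns a value
-- only via Python's negative-index wraparound, an accident of indexing.
def Pre_swaping (nowSwapIndex : Int) (swaps : List (Int × Int)) (data : List Int) : Prop :=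
  0 ≤ nowSwapIndex
instance (nowSwapIndex : Int) (swaps : List (Int × Int)) (data : List Int) : Decidable (Pre_swaping nowSwapIndex swaps data) := by unfold Pre_swaping; infer_instance
def pvWitness_swaping : Int × (List (Int × Int)) × List Int := (0, [], [5, 1, 4, 2, 3])

def Spec_swaping (nowSwapIndex : Int) (swaps : List (Int × Int)) (data : List Int) (out : List (Int × Int)) : Prop := out = swaping_alt nowSwapIndex swaps data
instance (nowSwapIndex : Int) (swaps : List (Int × Int)) (data : List Int) (out : List (Int × Int)) : Decidable (Spec_swaping nowSwapIndex swaps data out) := by unfold Spec_swaping; infer_instance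

-- ===== CLAIM (what is proved, stated in full; the proofs are below) =====
def Claim_equal_swaping : Prop := ∀ (nowSwapIndex : Int) (swaps : List (Int × Int)) (data : List Int), Dom_swaping nowSwapIndex swaps data → Pre_swaping nowSwapIndex swaps data → Spec_swaping nowSwapIndex swaps data (swaping nowSwapIndex swaps data)

-- ===== LEMMAS AND PROOFS =====

-- invariant: A's array is B's array with the held value v written at the current index i

theorem pyGetD_pySetD_ne (d : List Int) (i j v : Int) (h0 : 0 ≤ i) (hj0 : 0 ≤ j)
    (hj : j < (d.length : Int)) (hne : i ≠ j) :
    PySem.List.pyGetD (PySem.List.pySetD d i v) j 0 = PySem.List.pyGetD d j 0 := by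
  rw [PySem.List.pySetD_of_nonneg _ _ h0,
    PySem.List.pyGetD_eq_getElem _ _ hj0 (by simp [List.length_set]; omega),
    PySem.List.pyGetD_eq_getElem _ _ hj0 hj, List.getElem_set]
  rw [if_neg (by omega)]

theorem pyGetD_pySetD_self (d : List Int) (i v : Int) (h0 : 0 ≤ i) (hi : i < (d.length : Int)) :
    PySem.List.pyGetD (PySem.List.pySetD d i v) i 0 = v := by
  rw [PySem.List.pySetD_of_nonneg _ _ h0,
    PySem.List.pyGetD_eq_getElem _ _ h0 (by simp [List.length_set]; omega), List.getElem_set]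
  rw [if_pos rfl]

theorem pySetD_pySetD_self (d : List Int) (i a b : Int) (h0 : 0 ≤ i) :
    PySem.List.pySetD (PySem.List.pySetD d i a) i b = PySem.List.pySetD d i b := by
  rw [PySem.List.pySetD_of_nonneg _ _ h0, PySem.List.pySetD_of_nonneg _ _ h0,
    PySem.List.pySetD_of_nonneg _ _ h0]
  exact List.set_set a

theorem pySetD_self_getD (d : List Int) (i : Int) (h0 : 0 ≤ i) (hi : i < (d.length : Int)) :
    PySem.List.pySetD d i (PySem.List.pyGetD d i 0) = d := by
  rw [PySem.List.pySetD_of_nonneg _ _ h0, PySem.List.pyGetD_eq_getElem _ _ h0 hi]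
  exact List.set_getElem_self (by omega)

theorem siftLoop_eq (f : Nat) : ∀ (i v : Int) (swaps : List (Int × Int)) (d : List Int), 0 ≤ i →
    swapingFuel f i swaps (PySem.List.pySetD d i v) = siftLoop f i (2 * i + 1) v swaps d := by
  induction f with
  | zero => intro i v swaps d h0; rfl
  | succ f ih =>
    intro i v swaps d h0
    have hlen : PySem.List.len (PySem.List.pySetD d i v) = (d.length : Int) := by
      simp [PySem.List.len_eq, PySem.List.length_pySetD]
    by_cases hc : (i * 2 + 1 : Int) < (d.length : Int)
    · have hi : i < (d.length : Int) := by omega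
      have hr1 : PySem.List.pyGetD (PySem.List.pySetD d i v) (i * 2 + 1) 0
          = PySem.List.pyGetD d (i * 2 + 1) 0 :=
        pyGetD_pySetD_ne d i (i*2+1) v h0 (by omega) (by omega) (by omega)
      have hr2 : PySem.List.pyGetD (PySem.List.pySetD d i v) (i * 2 + 2) 0
          = PySem.List.pyGetD d (i * 2 + 2) 0 := by
        by_cases hc2 : (i * 2 + 2 : Int) < (d.length : Int)
        · exact pyGetD_pySetD_ne d i (i*2+2) v h0 (by omega) hc2 (by omega)
        · unfold PySem.List.pyGetD
          rw [(PySem.List.pyGet?_eq_none_iff _ _).2 (by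
              simp [PySem.Raise.InRange, PySem.List.length_pySetD]; omega),
            (PySem.List.pyGet?_eq_none_iff _ _).2 (by simp [PySem.Raise.InRange]; omega)]
      have hri : PySem.List.pyGetD (PySem.List.pySetD d i v) i 0 = v :=
        pyGetD_pySetD_self d i v h0 hi
      have hcol : ∀ (m x : Int), PySem.List.pySetD (PySem.List.pySetD (PySem.List.pySetD d i v) i x) m v
          = PySem.List.pySetD (PySem.List.pySetD d i x) m v := by
        intro m x; rw [pySetD_pySetD_self d i v x h0]
      rw [show (2 * i + 1 : Int) = i * 2 + 1 by ring]
      simp only [swapingFuel, siftLoop, hlen, PySem.List.len_eq, hr1, hr2, hri,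
        show (i * 2 + 1 + 1 : Int) = i * 2 + 2 by ring]
      split_ifs with h1 h2 h3 h4 h5 h6 h7 h8 h9 h10 h11 h12 h13 h14 <;>
        first
          | rfl
          | omega
          | (simp only [hr1, hr2, hcol]; exact ih _ v _ _ (by omega))
    · simp only [swapingFuel, siftLoop, hlen, PySem.List.len_eq]
      rw [if_pos (by omega), if_neg (by omega)]



-- ===== VERDICT (by name: the statement is the Claim_ definition above) =====
theorem swaping_spec : Claim_equal_swaping := by
  intro i swaps data _ h0
  unfold Spec_swaping swaping swaping_alt
  simp only [PySem.List.len_eq]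
  by_cases hg : (2 * i + 1 : Int) ≥ (data.length : Int)
  · rw [if_pos hg]
    simp only [swapingFuel, PySem.List.len_eq]
    rw [if_pos (by omega)]
  · rw [if_neg hg]
    have hi : i < (data.length : Int) := by omega
    have h := siftLoop_eq (data.length + 1) i (PySem.List.pyGetD data i 0) swaps data h0
    rwa [pySetD_self_getD data i h0 hi] at h
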